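-- pv_equiv track=rewrite | github.com/math919191/AdventOfCode22 | day17.py | updateChamber
-- ===== SOURCE A (Python) =====
-- def updateChamber(rockNum, chamber, rockCoor):
--     x = rockCoor[0]
--     y = rockCoor[1] + 1
--     if rockNum == 0:
--         for i in range(4):
--             chamber[x + i] = y
--     elif rockNum == 1:
--         chamber[x+1] = y+1
--         chamber[x] = y
--         chamber[x+2] = y
--
--     elif rockNum == 2:
--         for i in range(2):
--             chamber[x + i] = y
--         chamber[x+2] = y + 2
--     elif rockNum == 3:
--         chamber[x] = y + 3
--     elif rockNum == 4:
--         for i in range(2):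
--             chamber[x + i] = y + 1
--
--     return chamber
-- ===== SOURCE B (Python) =====
-- SPRITES = [
--     "####",
--     ".#.\n###",
--     "..#\n..#\n###",
--     "#\n#\n#\n#",
--     "##\n##",
-- ]
--
-- def columnHeights(sprite):
--     rows = sprite.splitlines()
--     n = len(rows)
--     heights = []
--     for col in range(len(rows[0])):
--         for r in range(n):
--             if rows[r][col] == '#':
--                 heights.append((col, n - 1 - r))
--                 break
--     return heights
--
-- def updateChamber(rockNum, chamber, rockCoor):
--     x = rockCoor[0]
--     y = rockCoor[1] + 1
--     if 0 <= rockNum < len(SPRITES):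
--         for col, h in columnHeights(SPRITES[rockNum]):
--             chamber[x + col] = y + h
--     return chamber
-- ===== Notes on version B (the rewrite author's own statement) =====
-- stated objective: alternative
-- what changed: Replaces the five hard-coded per-rock branches of point assignments with 2-D ASCII sprite bitmaps of the rocks: B scans each sprite column for its topmost '#' to derive the (column, height) writes, then applies them in one uniform pass.
-- outside the precondition, e.g. on updateChamber(1, {}, (0, 0)): A returns {1: 2, 0: 1, 2: 1}, B returns {0: 1, 1: 2, 2: 1}
import Mathlib
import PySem

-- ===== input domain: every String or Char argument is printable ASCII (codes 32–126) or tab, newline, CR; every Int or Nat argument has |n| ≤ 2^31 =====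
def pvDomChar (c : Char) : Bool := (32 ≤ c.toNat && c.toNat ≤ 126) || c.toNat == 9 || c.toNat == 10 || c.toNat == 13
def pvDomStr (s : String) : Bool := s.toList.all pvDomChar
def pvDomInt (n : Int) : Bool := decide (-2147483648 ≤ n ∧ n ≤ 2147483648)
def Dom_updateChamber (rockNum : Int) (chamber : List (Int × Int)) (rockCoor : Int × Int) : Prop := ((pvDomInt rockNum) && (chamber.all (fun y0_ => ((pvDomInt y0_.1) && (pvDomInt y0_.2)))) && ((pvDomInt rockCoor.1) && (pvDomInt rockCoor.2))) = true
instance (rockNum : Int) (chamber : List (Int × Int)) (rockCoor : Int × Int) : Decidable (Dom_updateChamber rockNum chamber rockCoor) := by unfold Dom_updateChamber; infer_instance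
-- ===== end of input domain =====

-- B derives each column's write by scanning a 2-D ASCII sprite of the rock for its topmost '#', instead of A's five hard-coded branches (alternative; return value proved equal on Pre_). Both Pythons mutate the chamber dict in place; the equivalence is about the returned mapping.


-- ===== PORT A =====
-- chamber is a Python dict (assoc list); each `chamber[k] = v` is a Dict.insert.
def updateChamber (rockNum : Int) (chamber : List (Int × Int)) (rockCoor : Int × Int) : List (Int × Int) :=
  let x := rockCoor.1
  let y := rockCoor.2 + 1
  let d := PySem.Dict.mk chamber
  (if rockNum = 0 then
    (PySem.List.pyRange 0 4 1).foldl (fun c i => c.insert (x + i) y) d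
  else if rockNum = 1 then
    ((d.insert (x + 1) (y + 1)).insert x y).insert (x + 2) y
  else if rockNum = 2 then
    ((PySem.List.pyRange 0 2 1).foldl (fun c i => c.insert (x + i) y) d).insert (x + 2) (y + 2)
  else if rockNum = 3 then
    d.insert x (y + 3)
  else if rockNum = 4 then
    (PySem.List.pyRange 0 2 1).foldl (fun c i => c.insert (x + i) (y + 1)) d
  else d).items

-- ===== PORT B =====
def pvSprites : List String := ["####", ".#.\n###", "..#\n..#\n###", "#\n#\n#\n#", "##\n##"]

-- columnHeights: scan each sprite column top-to-bottom for the first '#' (break); `.getD` defaults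
-- stand for indexing that never goes out of range on the literal sprites (Python would raise there).
def pvColumnHeights (sprite : String) : List (Int × Int) :=
  let rows := PySem.Str.splitlines sprite
  let n : Int := rows.length
  (PySem.List.pyRange 0 (PySem.Str.len ((PySem.List.pyGet? rows 0).getD "")) 1).foldl
    (fun heights col =>
      match (PySem.List.pyRange 0 n 1).find?
          (fun r => (PySem.Str.pyGet? ((PySem.List.pyGet? rows r).getD "") col) == some '#') with
      | some r => heights ++ [(col, n - 1 - r)]
      | none => heights) []

def updateChamber_alt (rockNum : Int) (chamber : List (Int × Int)) (rockCoor : Int × Int) : List (Int × Int) :=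
  let x := rockCoor.1
  let y := rockCoor.2 + 1
  (if 0 ≤ rockNum ∧ rockNum < (pvSprites.length : Int) then
    (pvColumnHeights ((PySem.List.pyGet? pvSprites rockNum).getD "")).foldl
      (fun c (p : Int × Int) => c.insert (x + p.1) (y + p.2)) (PySem.Dict.mk chamber)
  else PySem.Dict.mk chamber).items

-- ===== PRECONDITION & SPEC =====
-- Pre_ excludes rockNum = 1 inputs where any of columns x, x+1, x+2 is missing from chamber: there A
-- happens to append the new keys in order x+1, x, x+2 — an accidental dict-insertion order B does not
-- reproduce (B writes columns left to right); the resulting mappings are still equal.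
def Pre_updateChamber (rockNum : Int) (chamber : List (Int × Int)) (rockCoor : Int × Int) : Prop :=
  rockNum = 1 →
    ((PySem.Dict.mk chamber).contains rockCoor.1 = true ∧
     (PySem.Dict.mk chamber).contains (rockCoor.1 + 1) = true ∧
     (PySem.Dict.mk chamber).contains (rockCoor.1 + 2) = true)
instance (rockNum : Int) (chamber : List (Int × Int)) (rockCoor : Int × Int) : Decidable (Pre_updateChamber rockNum chamber rockCoor) := by unfold Pre_updateChamber; infer_instance
def pvWitness_updateChamber : Int × (List (Int × Int)) × (Int × Int) := (1, [(0, 3), (1, 2), (2, 0)], (0, 1))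
def Spec_updateChamber (rockNum : Int) (chamber : List (Int × Int)) (rockCoor : Int × Int) (out : List (Int × Int)) : Prop := out = updateChamber_alt rockNum chamber rockCoor
instance (rockNum : Int) (chamber : List (Int × Int)) (rockCoor : Int × Int) (out : List (Int × Int)) : Decidable (Spec_updateChamber rockNum chamber rockCoor out) := by unfold Spec_updateChamber; infer_instance

-- ===== CLAIM =====
def Claim_equal_updateChamber : Prop := ∀ (rockNum : Int) (chamber : List (Int × Int)) (rockCoor : Int × Int), Dom_updateChamber rockNum chamber rockCoor → Pre_updateChamber rockNum chamber rockCoor → Spec_updateChamber rockNum chamber rockCoor (updateChamber rockNum chamber rockCoor)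

-- ===== LEMMAS AND PROOFS =====

-- the sprite scans evaluate to the concrete write lists
theorem colHeights_0 : pvColumnHeights "####" = [(0, 0), (1, 0), (2, 0), (3, 0)] := by decide
theorem colHeights_1 : pvColumnHeights ".#.\n###" = [(0, 0), (1, 1), (2, 0)] := by decide
theorem colHeights_2 : pvColumnHeights "..#\n..#\n###" = [(0, 0), (1, 0), (2, 2)] := by decide
theorem colHeights_3 : pvColumnHeights "#\n#\n#\n#" = [(0, 3)] := by decide
theorem colHeights_4 : pvColumnHeights "##\n##" = [(0, 1), (1, 1)] := by decide

-- two inserts at distinct already-present keys commute (both only overwrite in place)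
theorem insert_comm_of_contains {κ ν : Type} [BEq κ] [LawfulBEq κ] (d : PySem.Dict κ ν)
    (k k' : κ) (v w : ν) (hk : d.contains k = true) (hk' : d.contains k' = true) (hne : k ≠ k') :
    (d.insert k v).insert k' w = (d.insert k' w).insert k v := by
  apply PySem.Dict.ext
  rw [PySem.Dict.items_insert_of_contains _ w (by simp [PySem.Dict.contains_insert, hk']),
      PySem.Dict.items_insert_of_contains _ v hk,
      PySem.Dict.items_insert_of_contains _ v (by simp [PySem.Dict.contains_insert, hk]),
      PySem.Dict.items_insert_of_contains _ w hk',
      List.map_map, List.map_map]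
  refine List.map_congr_left (fun p _ => ?_)
  simp only [Function.comp]
  by_cases h1 : p.1 = k <;> by_cases h2 : p.1 = k'
  · exact absurd (h1 ▸ h2) hne
  all_goals simp [h1, h2, hne, Ne.symm hne]

-- ===== VERDICT =====
theorem updateChamber_spec : Claim_equal_updateChamber := by
  intro rockNum chamber rockCoor _ hpre
  unfold Spec_updateChamber updateChamber updateChamber_alt pvSprites
  by_cases h0 : rockNum = 0
  · subst h0
    simp [colHeights_0, PySem.List.pyGet?, PySem.List.pyIdx?, PySem.List.pyRange, List.range_succ,
      List.foldl, add_zero]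
  by_cases h1 : rockNum = 1
  · subst h1
    obtain ⟨hx, hx1, hx2⟩ := hpre rfl
    have hg : ((PySem.List.pyGet? ["####", ".#.\n###", "..#\n..#\n###", "#\n#\n#\n#", "##\n##"] (1 : Int)).getD "") = ".#.\n###" := by decide
    simp only [hg, colHeights_1]
    norm_num [List.foldl]
    rw [insert_comm_of_contains _ _ _ _ _ hx1 hx (by omega)]
  by_cases h2 : rockNum = 2
  · subst h2
    simp [colHeights_2, PySem.List.pyGet?, PySem.List.pyIdx?, PySem.List.pyRange, List.range_succ,
      List.foldl, add_zero]
  by_cases h3 : rockNum = 3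
  · subst h3
    simp [colHeights_3, PySem.List.pyGet?, PySem.List.pyIdx?, List.foldl, add_zero]
  by_cases h4 : rockNum = 4
  · subst h4
    have hr2 : PySem.List.pyRange 0 2 1 = [0, 1] := by decide
    simp [colHeights_4, PySem.List.pyGet?, PySem.List.pyIdx?, hr2, List.foldl, add_zero]
  · have : ¬(0 ≤ rockNum ∧ rockNum < (5 : Int)) := by omega
    simp [h0, h1, h2, h3, h4, this]
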